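-- pv_equiv track=rewrite | github.com/ewilden/ARAE | pytorch/embed.py | split_on_punctuation
-- ===== SOURCE A (Python) =====
-- from string import punctuation
--
-- PUNCTUATION = set(punctuation)
--
-- def split_on_punctuation(document):
--   '''tokenizes string by splitting on spaces and punctuation
--   Args:
--     document: string
--   Returns:
--     generator of strings
--   '''
--
--   for token in document.split():
--     if len(token) == 1:
--       yield token
--     else:
--       chunk = token[0]
--       for char0, char1 in zip(token[:-1], token[1:]):
--         if (char0 in PUNCTUATION) == (char1 in PUNCTUATION):
--           chunk += char1
--         else:
--           yield chunk
--           chunk = char1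
--       if chunk:
--         yield chunk
-- ===== SOURCE B (Python) =====
-- from string import punctuation
--
-- PUNCTUATION = set(punctuation)
--
-- def split_on_punctuation(document):
--   '''tokenizes string by splitting on spaces and punctuation
--   Args:
--     document: string
--   Returns:
--     generator of strings
--   '''
--   # Stage 1: one pass over the whole document inserting a space at every
--   # boundary between a punctuation char and a non-punctuation char.
--   marked = []
--   prev = None  # class of previous char; None at start / after whitespace
--   for ch in document:
--     cls = None if ch.isspace() else (ch in PUNCTUATION)
--     if cls is not None and prev is not None and cls != prev:
--       marked.append(' ')
--     marked.append(ch)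
--     prev = cls
--   # Stage 2: a single whitespace split of the marked document.
--   yield from ''.join(marked).split()
-- ===== Notes on version B (the rewrite author's own statement) =====
-- stated objective: alternative
-- what changed: B is a staged-pass algorithm: one pass over the whole document inserts a space at every punctuation/non-punctuation boundary inside words, then a single whitespace split() of the marked document produces all tokens; A instead iterates per token of document.split() with a pairwise zip boundary scan and a chunk accumulator.
import Mathlib
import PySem

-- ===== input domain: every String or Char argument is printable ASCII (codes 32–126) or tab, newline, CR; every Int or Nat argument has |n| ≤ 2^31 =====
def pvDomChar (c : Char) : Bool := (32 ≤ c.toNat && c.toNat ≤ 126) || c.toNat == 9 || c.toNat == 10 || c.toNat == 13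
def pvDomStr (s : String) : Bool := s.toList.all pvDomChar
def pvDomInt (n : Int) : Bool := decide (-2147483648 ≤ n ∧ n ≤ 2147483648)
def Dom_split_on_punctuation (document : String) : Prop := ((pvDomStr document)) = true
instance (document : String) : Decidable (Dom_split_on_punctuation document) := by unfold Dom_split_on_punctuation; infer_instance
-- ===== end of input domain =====

-- B replaces A's per-token pairwise boundary scan by a staged algorithm: one pass over the
-- whole document inserting a space at each punctuation/non-punctuation boundary, then a
-- single whitespace split of the marked document; same return value, proved equal.

-- PUNCTUATION = set(string.punctuation); shared module constant of both versions
def PUNCT : List Char := "!\"#$%&'()*+,-./:;<=>?@[\\]^_`{|}~".toList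

def isPunct (c : Char) : Bool := PUNCT.contains c

-- ===== PORT A =====
-- the inner 'for char0, char1 in zip(token[:-1], token[1:])' loop; state = (yielded so far, chunk)
def pvLoopA : List String → List Char → List (Char × Char) → List String × List Char
  | res, chunk, [] => (res, chunk)
  | res, chunk, (c0, c1) :: ps =>
      if (isPunct c0) == (isPunct c1) then pvLoopA res (chunk ++ [c1]) ps
      else pvLoopA (res ++ [String.ofList chunk]) [c1] ps

-- body of the outer loop for one token (the generator's yields, in order)
def pvTokA (tok : List Char) : List String :=
  if tok.length = 1 then [String.ofList tok]
  else
    match PySem.List.pyGet? tok 0 with    -- token[0]; none unreachable: split() yields no empty token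
    | none => []
    | some c0 =>
      let rc := pvLoopA [] [c0]
        ((PySem.List.slice tok none (some (-1))).zip (PySem.List.slice tok (some 1) none))
      if rc.2 ≠ [] then rc.1 ++ [String.ofList rc.2] else rc.1

def split_on_punctuation (document : String) : List String :=
  (PySem.Str.split₀ document).foldl (fun acc tok => acc ++ pvTokA tok.toList) []

-- ===== PORT B =====
-- the inserted separator: ' ' iff both neighbours are word chars of different classes
def pvSep (cls prev : Option Bool) : List Char :=
  if cls.isSome && prev.isSome && cls != prev then [' '] else []

-- one step of B's marking loop; state = (marked so far, class of previous char:
-- none after whitespace/at start, some b for a word char with punctuation-membership b)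
def pvStepB (st : List Char × Option Bool) (ch : Char) : List Char × Option Bool :=
  let cls : Option Bool := if PySem.Chars.isspace ch then none else some (isPunct ch)
  (st.1 ++ pvSep cls st.2 ++ [ch], cls)

def split_on_punctuation_alt (document : String) : List String :=
  let st := document.toList.foldl pvStepB ([], none)
  (PySem.Chars.split₀ st.1).map String.ofList

-- ===== PRECONDITION & SPEC =====
def Spec_split_on_punctuation (document : String) (out : List String) : Prop := out = split_on_punctuation_alt document
instance (document : String) (out : List String) : Decidable (Spec_split_on_punctuation document out) := by unfold Spec_split_on_punctuation; infer_instance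

-- ===== CLAIM (what is proved, stated in full; the proofs are below) =====
def Claim_equal_split_on_punctuation : Prop := ∀ (document : String), Dom_split_on_punctuation document → Spec_split_on_punctuation document (split_on_punctuation document)

-- ===== LEMMAS AND PROOFS =====

-- class of a char: none = whitespace, some b = word char with punctuation-membership b
def pvK (c : Char) : Option Bool := if PySem.Chars.isspace c then none else some (isPunct c)

-- right-recursive form of B's marking pass
def pvMark : Option Bool → List Char → List Char
  | _, [] => []
  | prev, c :: cs => pvSep (pvK c) prev ++ c :: pvMark (pvK c) cs

theorem pvSplit₀_go (l : List Char) :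
    PySem.Chars.split₀ l = PySem.Chars.split₀.go l [] [] := rfl

-- canonical runs of a token: maximal blocks of equal punctuation-membership
def pvRuns : List Char → List (List Char)
  | [] => []
  | [c] => [[c]]
  | c :: d :: ds =>
      match pvRuns (d :: ds) with
      | [] => [[c]]
      | g :: gs => if isPunct c == isPunct d then (c :: g) :: gs else [c] :: g :: gs

def pvP (c : Char) : Bool := !(PySem.Chars.isspace c)

def pvFinish (rc : List String × List Char) : List String :=
  if rc.2 ≠ [] then rc.1 ++ [String.ofList rc.2] else rc.1

theorem pvRuns_ne_nil (c : Char) (cs : List Char) : pvRuns (c :: cs) ≠ [] := by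
  cases cs with
  | nil => simp [pvRuns]
  | cons d ds =>
    cases h : pvRuns (d :: ds) with
    | nil => simp [pvRuns, h]
    | cons g gs =>
      simp only [pvRuns, h]
      split <;> simp

-- ---- A-side: A equals token-wise pvRuns ----

-- A's loop state, finished: pre++[c] is the open chunk, c its last char, cs the chars still to pair
theorem pvLoopA_runs (cs : List Char) : ∀ (c : Char) (res : List String) (pre : List Char),
    pvFinish (pvLoopA res (pre ++ [c]) (((c :: cs).dropLast).zip cs))
    = match pvRuns (c :: cs) with
      | [] => res
      | g :: gs => res ++ String.ofList (pre ++ g) :: gs.map String.ofList := by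
  induction cs with
  | nil => intro c res pre; simp [pvLoopA, pvRuns, pvFinish]
  | cons d ds ih =>
    intro c res pre
    show pvFinish (pvLoopA res (pre ++ [c]) ((c, d) :: ((d :: ds).dropLast).zip ds)) = _
    by_cases h : isPunct c = isPunct d
    · rw [show pvLoopA res (pre ++ [c]) ((c, d) :: ((d :: ds).dropLast).zip ds)
            = pvLoopA res ((pre ++ [c]) ++ [d]) (((d :: ds).dropLast).zip ds) from by
          simp [pvLoopA, h]]
      rw [ih d res (pre ++ [c])]
      cases hr : pvRuns (d :: ds) with
      | nil => exact absurd hr (pvRuns_ne_nil d ds)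
      | cons g gs => simp [pvRuns, hr, h]
    · rw [show pvLoopA res (pre ++ [c]) ((c, d) :: ((d :: ds).dropLast).zip ds)
            = pvLoopA (res ++ [String.ofList (pre ++ [c])]) ([] ++ [d]) (((d :: ds).dropLast).zip ds) from by
          simp [pvLoopA, h]]
      rw [ih d (res ++ [String.ofList (pre ++ [c])]) []]
      cases hr : pvRuns (d :: ds) with
      | nil => exact absurd hr (pvRuns_ne_nil d ds)
      | cons g gs => simp [pvRuns, hr, h]

theorem pvTokA_eq_runs (tok : List Char) : pvTokA tok = (pvRuns tok).map String.ofList := by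
  cases tok with
  | nil => simp [pvTokA, pvRuns, PySem.List.pyGet?]
  | cons c cs =>
    cases cs with
    | nil => simp [pvTokA, pvRuns]
    | cons d ds =>
      have hp : PySem.List.pyGet? (c :: d :: ds) 0 = some c := by
        rw [PySem.List.pyGet?_zero_cons]
      have hlen : (c :: d :: ds).length ≠ 1 := by simp
      simp only [pvTokA, hlen, if_false, hp, PySem.List.slice_to_neg_one,
        PySem.List.slice_from_one, List.tail_cons]
      have h := pvLoopA_runs (d :: ds) c [] []
      simp only [List.nil_append] at h
      show pvFinish (pvLoopA [] [c] (((c :: d :: ds).dropLast).zip (d :: ds))) = _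
      rw [h]
      cases hr : pvRuns (c :: d :: ds) with
      | nil => exact absurd hr (pvRuns_ne_nil c (d :: ds))
      | cons g gs => simp

-- ---- B-side: the foldl builds pvMark ----

theorem pvFoldB (l : List Char) : ∀ (acc : List Char) (prev : Option Bool),
    (l.foldl pvStepB (acc, prev)).1 = acc ++ pvMark prev l := by
  induction l with
  | nil => intro acc prev; simp [pvMark]
  | cons c cs ih =>
    intro acc prev
    simp only [List.foldl_cons, pvStepB, pvMark]
    rw [ih]
    simp [pvK]

-- ---- split₀.go facts ----

theorem pvGo_acc (l : List Char) : ∀ (cur : List Char) (acc : List (List Char)),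
    PySem.Chars.split₀.go l cur acc = acc.reverse ++ PySem.Chars.split₀.go l cur [] := by
  induction l with
  | nil =>
    intro cur acc
    simp only [PySem.Chars.split₀.go]
    split <;> simp
  | cons c cs ih =>
    intro cur acc
    simp only [PySem.Chars.split₀.go]
    split
    · split
      · exact ih [] acc
      · rw [ih [] (cur.reverse :: acc), ih [] [cur.reverse]]; simp
    · exact ih (c :: cur) acc

-- a nonempty current token: the first piece is cur.reverse plus the rest of the word
theorem pvGo_tok (cs : List Char) : ∀ (cur : List Char), cur ≠ [] →
    PySem.Chars.split₀.go cs cur []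
    = (cur.reverse ++ cs.takeWhile pvP) :: PySem.Chars.split₀ (cs.dropWhile pvP) := by
  induction cs with
  | nil =>
    intro cur h
    simp [PySem.Chars.split₀.go, PySem.Chars.split₀, List.isEmpty_iff, h]
  | cons c cs ih =>
    intro cur h
    by_cases hs : PySem.Chars.isspace c = true
    · have : PySem.Chars.split₀.go (c :: cs) cur []
          = PySem.Chars.split₀.go cs [] [cur.reverse] := by
        simp [PySem.Chars.split₀.go, hs, List.isEmpty_iff, h]
      rw [this, pvGo_acc]
      simp [List.takeWhile, List.dropWhile, pvP, hs, PySem.Chars.split₀,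
        show PySem.Chars.split₀.go (c :: cs) [] [] = PySem.Chars.split₀.go cs [] [] from by
          simp [PySem.Chars.split₀.go, hs]]
    · have : PySem.Chars.split₀.go (c :: cs) cur []
          = PySem.Chars.split₀.go cs (c :: cur) [] := by
        simp [PySem.Chars.split₀.go, hs]
      rw [this, ih (c :: cur) (by simp)]
      simp [List.takeWhile, List.dropWhile, pvP, hs]

-- ---- pvRuns algebra ----

theorem pvRuns_const (p : Bool) : ∀ (xs : List Char), xs ≠ [] → (∀ x ∈ xs, isPunct x = p) →
    pvRuns xs = [xs] := by
  intro xs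
  induction xs with
  | nil => intro h; exact absurd rfl h
  | cons c cs ih =>
    intro _ hall
    cases cs with
    | nil => simp [pvRuns]
    | cons d ds =>
      have hr := ih (by simp) (fun x hx => hall x (List.mem_cons_of_mem c hx))
      have hc : isPunct c = p := hall c (by simp)
      have hd : isPunct d = p := hall d (by simp)
      simp [pvRuns, hr, hc, hd]

theorem pvRuns_split (p : Bool) : ∀ (xs : List Char) (c : Char) (ys : List Char),
    xs ≠ [] → (∀ x ∈ xs, isPunct x = p) → isPunct c ≠ p →
    pvRuns (xs ++ c :: ys) = xs :: pvRuns (c :: ys) := by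
  intro xs
  induction xs with
  | nil => intro c ys h; exact absurd rfl h
  | cons a as ih =>
    intro c ys _ hall hc
    have ha : isPunct a = p := hall a (by simp)
    cases as with
    | nil =>
      cases hr : pvRuns (c :: ys) with
      | nil => exact absurd hr (pvRuns_ne_nil c ys)
      | cons g gs =>
        simp only [List.cons_append, List.nil_append]
        show pvRuns (a :: c :: ys) = _
        have : isPunct a ≠ isPunct c := by rw [ha]; exact fun h => hc h.symm
        simp [pvRuns, hr, this]
    | cons b bs =>
      have hb : isPunct b = p := hall b (by simp)
      have hr := ih c ys (by simp) (fun x hx => hall x (List.mem_cons_of_mem a hx)) hc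
      simp only [List.cons_append] at hr ⊢
      show pvRuns (a :: b :: (bs ++ c :: ys)) = _
      simp [pvRuns, hr, ha, hb]

theorem pvK_some (c : Char) (b : Bool) (h : pvK c = some b) :
    PySem.Chars.isspace c = false ∧ isPunct c = b := by
  unfold pvK at h
  by_cases hs : PySem.Chars.isspace c = true
  · simp [hs] at h
  · simp [hs] at h ⊢; exact h

-- ---- the main staged-pass correctness: split of the marked list = runs per token ----

theorem pvMain : ∀ (l : List Char),
    (PySem.Chars.split₀ (pvMark none l) = (PySem.Chars.split₀ l).flatMap pvRuns)
    ∧ (∀ (b : Bool) (cur : List Char), cur ≠ [] → (∀ x ∈ cur, pvK x = some b) →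
        PySem.Chars.split₀.go (pvMark (some b) l) cur []
        = pvRuns (cur.reverse ++ l.takeWhile pvP)
          ++ (PySem.Chars.split₀ (l.dropWhile pvP)).flatMap pvRuns) := by
  intro l
  induction l with
  | nil =>
    constructor
    · simp [pvMark, PySem.Chars.split₀, PySem.Chars.split₀.go]
    · intro b cur h hall
      have : ∀ x ∈ cur.reverse, isPunct x = b := fun x hx =>
        (pvK_some x b (hall x (List.mem_reverse.mp hx))).2
      simp [pvMark, PySem.Chars.split₀.go, PySem.Chars.split₀, List.isEmpty_iff, h,
        pvRuns_const b cur.reverse (by simp [h]) this]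
  | cons c cs ih =>
    constructor
    · cases hk : pvK c with
      | none =>
        have hs : PySem.Chars.isspace c = true := by
          by_contra hs; simp [pvK, hs] at hk
        have : pvMark none (c :: cs) = c :: pvMark none cs := by simp [pvMark, hk, pvSep]
        rw [this]
        show PySem.Chars.split₀.go (c :: pvMark none cs) [] [] = _
        rw [show PySem.Chars.split₀.go (c :: pvMark none cs) [] []
              = PySem.Chars.split₀.go (pvMark none cs) [] [] from by
            simp [PySem.Chars.split₀.go, hs]]
        rw [show PySem.Chars.split₀ (c :: cs) = PySem.Chars.split₀ cs from by
            simp [PySem.Chars.split₀, PySem.Chars.split₀.go, hs]]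
        exact ih.1
      | some b =>
        obtain ⟨hs, hpc⟩ := pvK_some c b hk
        have : pvMark none (c :: cs) = c :: pvMark (some b) cs := by simp [pvMark, hk, pvSep]
        rw [this]
        show PySem.Chars.split₀.go (c :: pvMark (some b) cs) [] [] = _
        rw [show PySem.Chars.split₀.go (c :: pvMark (some b) cs) [] []
              = PySem.Chars.split₀.go (pvMark (some b) cs) [c] [] from by
            simp [PySem.Chars.split₀.go, hs]]
        rw [ih.2 b [c] (by simp) (by simpa [pvK, hs] using hpc)]
        rw [show PySem.Chars.split₀ (c :: cs) = PySem.Chars.split₀.go cs [c] [] from by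
            simp [PySem.Chars.split₀, PySem.Chars.split₀.go, hs]]
        rw [pvGo_tok cs [c] (by simp)]
        simp
    · intro b cur h hall
      have hallrev : ∀ x ∈ cur.reverse, isPunct x = b := fun x hx =>
        (pvK_some x b (hall x (List.mem_reverse.mp hx))).2
      cases hk : pvK c with
      | none =>
        have hs : PySem.Chars.isspace c = true := by
          by_contra hs; simp [pvK, hs] at hk
        have : pvMark (some b) (c :: cs) = c :: pvMark none cs := by simp [pvMark, hk, pvSep]
        rw [this]
        rw [show PySem.Chars.split₀.go (c :: pvMark none cs) cur []
              = PySem.Chars.split₀.go (pvMark none cs) [] [cur.reverse] from by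
            simp [PySem.Chars.split₀.go, hs, List.isEmpty_iff, h]]
        rw [pvGo_acc, ← pvSplit₀_go, ih.1]
        have ht : (c :: cs).takeWhile pvP = [] := by simp [List.takeWhile, pvP, hs]
        have hd : (c :: cs).dropWhile pvP = c :: cs := by simp [List.dropWhile, pvP, hs]
        rw [ht, hd]
        rw [show PySem.Chars.split₀ (c :: cs) = PySem.Chars.split₀ cs from by
            simp [PySem.Chars.split₀, PySem.Chars.split₀.go, hs]]
        simp [pvRuns_const b cur.reverse (by simp [h]) hallrev]
      | some b' =>
        obtain ⟨hs, hpc⟩ := pvK_some c b' hk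
        have ht : (c :: cs).takeWhile pvP = c :: cs.takeWhile pvP := by
          simp [List.takeWhile, pvP, hs]
        have hd : (c :: cs).dropWhile pvP = cs.dropWhile pvP := by
          simp [List.dropWhile, pvP, hs]
        by_cases hbb : b' = b
        · subst hbb
          have : pvMark (some b') (c :: cs) = c :: pvMark (some b') cs := by
            simp [pvMark, hk, pvSep]
          rw [this]
          rw [show PySem.Chars.split₀.go (c :: pvMark (some b') cs) cur []
                = PySem.Chars.split₀.go (pvMark (some b') cs) (c :: cur) [] from by
              simp [PySem.Chars.split₀.go, hs]]
          rw [ih.2 b' (c :: cur) (by simp) (by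
            intro x hx
            rcases List.mem_cons.mp hx with hx | hx
            · subst hx; exact hk
            · exact hall x hx)]
          rw [ht, hd]
          simp
        · have : pvMark (some b) (c :: cs) = ' ' :: c :: pvMark (some b') cs := by
            simp [pvMark, hk, pvSep, bne_iff_ne, hbb]
          rw [this]
          rw [show PySem.Chars.split₀.go (' ' :: c :: pvMark (some b') cs) cur []
                = PySem.Chars.split₀.go (c :: pvMark (some b') cs) [] [cur.reverse] from by
              simp [PySem.Chars.split₀.go, PySem.Chars.isspace, List.isEmpty_iff, h]]
          rw [pvGo_acc]
          rw [show PySem.Chars.split₀.go (c :: pvMark (some b') cs) [] []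
                = PySem.Chars.split₀.go (pvMark (some b') cs) [c] [] from by
              simp [PySem.Chars.split₀.go, hs]]
          rw [ih.2 b' [c] (by simp) (by simpa [pvK, hs] using hpc)]
          rw [ht, hd]
          rw [pvRuns_split b cur.reverse c (cs.takeWhile pvP)
            (by simp [h]) hallrev (by rw [hpc]; exact hbb)]
          simp

-- ===== VERDICT (by name: the statement is the Claim_ definition above) =====
theorem split_on_punctuation_spec : Claim_equal_split_on_punctuation := by
  intro document _
  unfold Spec_split_on_punctuation split_on_punctuation split_on_punctuation_alt
  rw [PySem.List.foldl_append_eq_flatMap]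
  simp only [List.nil_append]
  rw [pvFoldB document.toList [] none]
  simp only [List.nil_append, (pvMain document.toList).1]
  simp only [List.map_flatMap, pvTokA_eq_runs]
  rw [← PySem.Str.split₀_map_toList, List.flatMap_map]
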